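-- pv_equiv track=rewrite | github.com/joeljohansson99/adventofcode | 2019/python/src/day8.py | part2
-- ===== SOURCE A (Python) =====
-- def part2(input):
--     data = [input[0][i:i+25] for i in range(0, len(input[0]), 25)]
--     layers = [data[i:i+6] for i in range(0, len(data), 6)]
--
--     image = [['2']*25 for _ in range(6)]
--
--     for layer in layers:
--         for r in range(len(layer)):
--             for c in range(len(layer[r])):
--                 if image[r][c] == '2':
--                     image[r][c] = layer[r][c]
--
--     return "\n"+"\n".join(["".join(row).replace('0', ' ').replace('1', '#') for row in image])
-- ===== SOURCE B (Python) =====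
-- def part2(input):
--     data = [input[0][i:i+25] for i in range(0, len(input[0]), 25)]
--     layers = [data[i:i+6] for i in range(0, len(data), 6)]
--
--     rows = []
--     for r in range(6):
--         row = []
--         for c in range(25):
--             pix = '2'
--             for layer in layers:
--                 if r < len(layer) and c < len(layer[r]) and layer[r][c] != '2':
--                     pix = layer[r][c]
--                     break
--             row.append(' ' if pix == '0' else '#' if pix == '1' else pix)
--         rows.append(''.join(row))
--     return "\n" + "\n".join(rows)
-- ===== Notes on version B (the rewrite author's own statement) =====
-- stated objective: alternative
-- what changed: B composites the image pixel-major: for each of the 6x25 positions it scans the layers in order and takes the first in-bounds pixel that is not '2' (stopping early), mapping '0'/'1' per pixel, instead of A's layer-major sweep that mutates a pre-allocated grid and then does string replaces.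
-- outside the precondition, e.g. on part2([]): A raises IndexError, B raises IndexError
import Mathlib
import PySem

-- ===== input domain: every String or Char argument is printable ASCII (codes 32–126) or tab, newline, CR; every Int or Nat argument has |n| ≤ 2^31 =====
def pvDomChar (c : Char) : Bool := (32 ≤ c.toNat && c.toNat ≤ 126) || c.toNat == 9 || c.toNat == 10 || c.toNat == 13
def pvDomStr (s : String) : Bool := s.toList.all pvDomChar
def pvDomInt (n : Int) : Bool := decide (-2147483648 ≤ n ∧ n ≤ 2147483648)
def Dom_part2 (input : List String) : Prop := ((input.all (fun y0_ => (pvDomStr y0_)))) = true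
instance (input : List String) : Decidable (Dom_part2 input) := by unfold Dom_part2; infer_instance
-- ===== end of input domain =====

-- B rebuilds the image pixel-major (first non-'2' layer per pixel, stopping early) instead of
-- A's layer-major sweep over a mutable grid; objective: alternative decomposition, same cost.

-- ===== PORT A =====
-- data = [input[0][i:i+25] for i in range(0, len(input[0]), 25)]  (shared verbatim line of both Pythons)
def pvRows (s : List Char) : List (List Char) :=
  (PySem.List.pyRange 0 (s.length : Int) 25).map
    (fun i => PySem.List.slice s (some i) (some (i + 25)))

-- layers = [data[i:i+6] for i in range(0, len(data), 6)]  (shared verbatim line of both Pythons)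
def pvLayers (data : List (List Char)) : List (List (List Char)) :=
  (PySem.List.pyRange 0 (data.length : Int) 6).map
    (fun i => PySem.List.slice data (some i) (some (i + 6)))

-- the loop body: if image[r][c] == '2': image[r][c] = layer[r][c]
def pvStep (layer : List (List Char)) (image : List (List Char)) (r c : Int) :
    List (List Char) :=
  if PySem.List.pyGetD (PySem.List.pyGetD image r []) c '*' = '2' then
    PySem.List.pySetD image r
      (PySem.List.pySetD (PySem.List.pyGetD image r []) c
        (PySem.List.pyGetD (PySem.List.pyGetD layer r []) c '*'))
  else image

-- for r in range(len(layer)): for c in range(len(layer[r])): …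
def pvApplyLayer (image : List (List Char)) (layer : List (List Char)) :
    List (List Char) :=
  (PySem.List.pyRange 0 (layer.length : Int) 1).foldl
    (fun image r =>
      (PySem.List.pyRange 0 ((PySem.List.pyGetD layer r []).length : Int) 1).foldl
        (fun image c => pvStep layer image r c) image)
    image

def part2 (input : List String) : String :=
  let s : List Char := (PySem.List.pyGetD input 0 "").toList
  let data := pvRows s
  let layers := pvLayers data
  let image0 : List (List Char) := List.replicate 6 (List.replicate 25 '2')
  let image := layers.foldl (fun im l => pvApplyLayer im l) image0
  String.ofList ('\n' :: PySem.Chars.join ['\n']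
    (image.map (fun row =>
      PySem.Chars.replace (PySem.Chars.replace row ['0'] [' ']) ['1'] ['#'])))

-- ===== PORT B =====
-- inner loop of B: scan the layers, take the first in-bounds pixel that is not '2', stop there
def pvFirst (layers : List (List (List Char))) (r c : Nat) : Char :=
  match layers with
  | [] => '2'
  | layer :: rest =>
    match layer[r]? with
    | some row =>
      match row[c]? with
      | some ch => if ch ≠ '2' then ch else pvFirst rest r c
      | none => pvFirst rest r c
    | none => pvFirst rest r c

-- ' ' if pix == '0' else '#' if pix == '1' else pix
def pvPix (ch : Char) : Char := if ch = '0' then ' ' else if ch = '1' then '#' else ch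

def part2_alt (input : List String) : String :=
  let s : List Char := (PySem.List.pyGetD input 0 "").toList
  let layers := pvLayers (pvRows s)
  let rows : List (List Char) :=
    (List.range 6).map (fun r => (List.range 25).map (fun c => pvPix (pvFirst layers r c)))
  String.ofList ('\n' :: PySem.Chars.join ['\n'] rows)

-- ===== PRECONDITION & SPEC =====
-- Pre_ excludes only the empty list, on which the Python A raises IndexError at input[0].
def Pre_part2 (input : List String) : Prop := input ≠ []
instance (input : List String) : Decidable (Pre_part2 input) := by
  unfold Pre_part2; infer_instance

def pvWitness_part2 : List String := ["011202122001120212200112021220"]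

def Spec_part2 (input : List String) (out : String) : Prop := out = part2_alt input
instance (input : List String) (out : String) : Decidable (Spec_part2 input out) := by
  unfold Spec_part2; infer_instance

-- ===== CLAIM (what is proved, stated in full; the proofs are below) =====
def Claim_equal_part2 : Prop :=
  ∀ (input : List String), Dom_part2 input → Pre_part2 input → Spec_part2 input (part2 input)

-- ===== LEMMAS AND PROOFS =====

-- Nat-indexed view of A's loop body and loops
def pvStepN (layer : List (List Char)) (image : List (List Char)) (r c : Nat) :
    List (List Char) :=
  if (image.getD r []).getD c '*' = '2' then
    image.set r ((image.getD r []).set c ((layer.getD r []).getD c '*'))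
  else image

def pvCFold (layer : List (List Char)) (image : List (List Char)) (r m : Nat) :
    List (List Char) :=
  (List.range m).foldl (fun image c => pvStepN layer image r c) image

def pvRFold (layer : List (List Char)) (image : List (List Char)) (n : Nat) :
    List (List Char) :=
  (List.range n).foldl (fun image r => pvCFold layer image r (layer.getD r []).length) image

theorem pvApplyLayer_eq (image layer : List (List Char)) :
    pvApplyLayer image layer = pvRFold layer image layer.length := by
  unfold pvApplyLayer pvRFold pvCFold
  rw [PySem.List.pyRange_zero_nat, List.foldl_map]
  congr 1
  funext img r
  rw [PySem.List.pyGetD_natCast, PySem.List.pyRange_zero_nat, List.foldl_map]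
  congr 1
  funext img' c
  simp [pvStep, pvStepN, PySem.List.pyGetD_natCast, PySem.List.pySetD_natCast]

theorem pvStepN_len (layer image : List (List Char)) (r c : Nat) :
    (pvStepN layer image r c).length = image.length := by
  unfold pvStepN; split <;> simp

theorem pvStepN_rowlen (layer image : List (List Char)) (r c r' : Nat) :
    ((pvStepN layer image r c).getD r' []).length = (image.getD r' []).length := by
  unfold pvStepN
  split
  · by_cases h : r = r'
    · subst h
      by_cases hr : r < image.length
      · rw [List.getD_eq_getElem?_getD, List.getElem?_set, if_pos rfl, if_pos hr,
          Option.getD_some, List.length_set, List.getD_eq_getElem?_getD,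
          List.getElem?_eq_getElem hr, Option.getD_some]
      · rw [List.getD_eq_getElem?_getD, List.getElem?_set, if_pos rfl, if_neg hr,
          List.getD_eq_getElem?_getD,
          List.getElem?_eq_none_iff.mpr (show image.length ≤ r by omega)]
    · rw [List.getD_eq_getElem?_getD, List.getElem?_set, if_neg h,
        ← List.getD_eq_getElem?_getD]
  · rfl

theorem pvStepN_get (layer image : List (List Char)) (r c r' c' : Nat)
    (hr : r < image.length) (hc : c < (image.getD r []).length) :
    ((pvStepN layer image r c).getD r' []).getD c' '*' =
      if r' = r ∧ c' = c ∧ (image.getD r []).getD c '*' = '2' then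
        (layer.getD r []).getD c '*'
      else (image.getD r' []).getD c' '*' := by
  unfold pvStepN
  by_cases h2 : (image.getD r []).getD c '*' = '2'
  · rw [if_pos h2]
    by_cases hrr : r' = r
    · subst hrr
      rw [show ((image.set r' ((image.getD r' []).set c ((layer.getD r' []).getD c '*'))).getD r' []) = (image.getD r' []).set c ((layer.getD r' []).getD c '*') by
        simp [List.getD_eq_getElem?_getD, List.getElem?_set, hr]]
      simp only [List.getD_eq_getElem?_getD] at hc h2 ⊢
      by_cases hcc : c' = c
      · subst hcc
        have h2' : ((image[r']?.getD [])[c']'hc) = '2' := by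
          rwa [List.getElem?_eq_getElem hc, Option.getD_some] at h2
        simp [List.getElem?_set, hc, h2, h2']
      · have h1 : ¬ c = c' := fun h => hcc h.symm
        simp [h1, hcc]
    · have hne : ¬ r = r' := fun h => hrr h.symm
      rw [show ((image.set r ((image.getD r []).set c ((layer.getD r []).getD c '*'))).getD r' []) = image.getD r' [] by
        rw [List.getD_eq_getElem?_getD, List.getElem?_set, if_neg hne, ← List.getD_eq_getElem?_getD]]
      simp [hrr]
  · rw [if_neg h2, if_neg (by tauto)]

theorem pvCFold_succ (layer image : List (List Char)) (r m : Nat) :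
    pvCFold layer image r (m + 1) = pvStepN layer (pvCFold layer image r m) r m := by
  unfold pvCFold; rw [List.range_succ, List.foldl_append]; rfl

theorem pvCFold_len (layer image : List (List Char)) (r m : Nat) :
    (pvCFold layer image r m).length = image.length := by
  induction m with
  | zero => rfl
  | succ m ih => rw [pvCFold_succ, pvStepN_len, ih]

theorem pvCFold_rowlen (layer image : List (List Char)) (r m r' : Nat) :
    ((pvCFold layer image r m).getD r' []).length = (image.getD r' []).length := by
  induction m with
  | zero => rfl
  | succ m ih => rw [pvCFold_succ, pvStepN_rowlen, ih]

theorem pvCFold_get (layer image : List (List Char)) (r m : Nat)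
    (hr : r < image.length) (hm : m ≤ (image.getD r []).length) :
    ∀ r' c' : Nat,
    ((pvCFold layer image r m).getD r' []).getD c' '*' =
      if r' = r ∧ c' < m ∧ (image.getD r []).getD c' '*' = '2' then
        (layer.getD r []).getD c' '*'
      else (image.getD r' []).getD c' '*' := by
  induction m with
  | zero => intro r' c'; simp [pvCFold]
  | succ m ih =>
    have hm' : m ≤ (image.getD r []).length := by omega
    intro r' c'
    rw [pvCFold_succ,
      pvStepN_get layer _ r m r' c' (by rw [pvCFold_len]; exact hr)
        (by rw [pvCFold_rowlen]; omega),
      ih hm' r' c', ih hm' r m]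
    simp only [lt_irrefl, and_false, false_and, if_false]
    by_cases hrr : r' = r
    · simp only [hrr]
      by_cases hcc : c' = m
      · simp only [hcc]
        by_cases h2 : (image.getD r []).getD m '*' = '2'
        · simp [h2, Nat.lt_succ_self]
        · simp [h2]
      · have hiff : (c' < m + 1) ↔ (c' < m) := by omega
        simp [hcc, hiff]
    · simp [hrr]

theorem pvRFold_succ (layer image : List (List Char)) (n : Nat) :
    pvRFold layer image (n + 1) =
      pvCFold layer (pvRFold layer image n) n (layer.getD n []).length := by
  unfold pvRFold; rw [List.range_succ, List.foldl_append]; rfl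

theorem pvRFold_len (layer image : List (List Char)) (n : Nat) :
    (pvRFold layer image n).length = image.length := by
  induction n with
  | zero => rfl
  | succ n ih => rw [pvRFold_succ, pvCFold_len, ih]

theorem pvRFold_rowlen (layer image : List (List Char)) (n r' : Nat) :
    ((pvRFold layer image n).getD r' []).length = (image.getD r' []).length := by
  induction n with
  | zero => rfl
  | succ n ih => rw [pvRFold_succ, pvCFold_rowlen, ih]

theorem pvRFold_get (layer image : List (List Char)) (n : Nat)
    (hn : n ≤ layer.length) (hlen : layer.length ≤ image.length)
    (hrow : ∀ r < layer.length, (layer.getD r []).length ≤ (image.getD r []).length) :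
    ∀ r' c' : Nat,
    ((pvRFold layer image n).getD r' []).getD c' '*' =
      if r' < n ∧ c' < (layer.getD r' []).length ∧ (image.getD r' []).getD c' '*' = '2' then
        (layer.getD r' []).getD c' '*'
      else (image.getD r' []).getD c' '*' := by
  induction n with
  | zero => intro r' c'; simp [pvRFold]
  | succ n ih =>
    have hn' : n ≤ layer.length := by omega
    intro r' c'
    rw [pvRFold_succ,
      pvCFold_get layer (pvRFold layer image n) n (layer.getD n []).length
        (by rw [pvRFold_len]; omega)
        (by rw [pvRFold_rowlen]; exact hrow n (by omega)) r' c',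
      ih hn' r' c', ih hn' n c']
    simp only [lt_irrefl, false_and, if_false]
    by_cases hrr : r' = n
    · simp only [hrr]
      by_cases hcl : c' < (layer.getD n []).length
      · by_cases h2 : (image.getD n []).getD c' '*' = '2'
        · simp [hcl, h2, Nat.lt_succ_self]
        · simp [h2]
      · simp [hcl]
    · have hiff : (r' < n + 1) ↔ (r' < n) := by omega
      simp [hrr, hiff]

-- pvFirst through getD guards
theorem pvFirst_cons (layer : List (List Char)) (rest : List (List (List Char))) (r c : Nat) :
    pvFirst (layer :: rest) r c =
      if r < layer.length ∧ c < (layer.getD r []).length ∧ (layer.getD r []).getD c '*' ≠ '2'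
      then (layer.getD r []).getD c '*' else pvFirst rest r c := by
  rcases h : layer[r]? with _ | row
  · have hr : ¬ r < layer.length := by
      rw [List.getElem?_eq_none_iff] at h; omega
    rw [if_neg (fun hcon => hr hcon.1)]
    simp only [pvFirst, h]
  · obtain ⟨hr, _⟩ := List.getElem?_eq_some_iff.mp h
    have hrow : layer.getD r [] = row := by
      rw [List.getD_eq_getElem?_getD, h, Option.getD_some]
    rcases h2 : row[c]? with _ | ch
    · have hc : ¬ c < row.length := by
        rw [List.getElem?_eq_none_iff] at h2; omega
      have hcond : ¬(r < layer.length ∧ c < (layer.getD r []).length ∧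
          (layer.getD r []).getD c '*' ≠ '2') := by
        rw [hrow]; exact fun hcon => hc hcon.2.1
      rw [if_neg hcond]
      simp only [pvFirst, h, h2]
    · obtain ⟨hc, _⟩ := List.getElem?_eq_some_iff.mp h2
      have hch : row.getD c '*' = ch := by
        rw [List.getD_eq_getElem?_getD, h2, Option.getD_some]
      by_cases hne : ch = '2'
      · have hcond : ¬(r < layer.length ∧ c < (layer.getD r []).length ∧
            (layer.getD r []).getD c '*' ≠ '2') := by
          rw [hrow, hch]; exact fun hcon => hcon.2.2 hne
        rw [if_neg hcond]
        simp only [pvFirst, h, h2]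
        rw [if_neg (by simp [hne])]
      · have hcond : r < layer.length ∧ c < (layer.getD r []).length ∧
            (layer.getD r []).getD c '*' ≠ '2' := by
          rw [hrow, hch]; exact ⟨hr, hc, hne⟩
        rw [if_pos hcond, hrow, hch]
        simp only [pvFirst, h, h2]
        rw [if_pos hne]

theorem pvCombine (p q : Prop) [Decidable p] [Decidable q] (lv iv F : Char) :
    (if (if p ∧ q ∧ iv = '2' then lv else iv) = '2' then F
     else (if p ∧ q ∧ iv = '2' then lv else iv)) =
    if iv = '2' then (if p ∧ q ∧ lv ≠ '2' then lv else F) else iv := by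
  by_cases hi : iv = '2'
  · by_cases hp : p
    · by_cases hq : q
      · by_cases hl : lv = '2' <;> simp [hp, hq, hi, hl]
      · simp [hp, hq, hi]
    · simp [hp, hi]
  · simp [hi]

def pvWF (layers : List (List (List Char))) : Prop :=
  ∀ layer ∈ layers, layer.length ≤ 6 ∧ ∀ row ∈ layer, row.length ≤ 25

theorem pvFoldLayers (layers : List (List (List Char))) :
    ∀ (image : List (List Char)), pvWF layers → image.length = 6 →
    (∀ r' < 6, ((image.getD r' []).length = 25)) →
    (layers.foldl (fun im l => pvApplyLayer im l) image).length = 6 ∧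
    (∀ r' < 6, (((layers.foldl (fun im l => pvApplyLayer im l) image).getD r' []).length = 25)) ∧
    ∀ r' c' : Nat,
      (((layers.foldl (fun im l => pvApplyLayer im l) image).getD r' []).getD c' '*' =
        if (image.getD r' []).getD c' '*' = '2' then pvFirst layers r' c'
        else (image.getD r' []).getD c' '*') := by
  induction layers with
  | nil =>
    intro image _ hlen hrow
    refine ⟨hlen, hrow, fun r' c' => ?_⟩
    split
    · next h => simpa [pvFirst] using h
    · rfl
  | cons l ls ih =>
    intro image hWF hlen hrow
    have hl := hWF l (by simp)
    have hlrow : ∀ r < l.length, (l.getD r []).length ≤ (image.getD r []).length := by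
      intro r hrl
      have : l.getD r [] ∈ l := by
        rw [List.getD_eq_getElem?_getD, List.getElem?_eq_getElem hrl]
        exact List.getElem_mem hrl
      have := hl.2 _ this
      rw [hrow r (by omega)]; exact this
    have hlen' : (pvApplyLayer image l).length = 6 := by
      rw [pvApplyLayer_eq, pvRFold_len, hlen]
    have hrow' : ∀ r' < 6, ((pvApplyLayer image l).getD r' []).length = 25 := by
      intro r' h; rw [pvApplyLayer_eq, pvRFold_rowlen]; exact hrow r' h
    have hget : ∀ r' c' : Nat, ((pvApplyLayer image l).getD r' []).getD c' '*' =
        if r' < l.length ∧ c' < (l.getD r' []).length ∧ (image.getD r' []).getD c' '*' = '2'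
        then (l.getD r' []).getD c' '*' else (image.getD r' []).getD c' '*' := by
      intro r' c'
      rw [pvApplyLayer_eq]
      exact pvRFold_get l image l.length (le_refl _) (by omega) hlrow r' c'
    obtain ⟨g1, g2, g3⟩ := ih (pvApplyLayer image l)
      (fun x hx => hWF x (by simp [hx])) hlen' hrow'
    refine ⟨g1, g2, fun r' c' => ?_⟩
    rw [List.foldl_cons, g3 r' c', hget r' c', pvFirst_cons]
    exact pvCombine _ _ _ _ _

theorem pvWF_layers (s : List Char) : pvWF (pvLayers (pvRows s)) := by
  intro layer hmem
  simp only [pvLayers, List.mem_map] at hmem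
  obtain ⟨i, hi, rfl⟩ := hmem
  have hi0 : 0 ≤ i := ((PySem.List.mem_pyRange_iff_of_pos (by norm_num) i).mp hi).1
  rw [PySem.List.slice_toNat _ hi0 (by omega)]
  have h6 : (i + 6).toNat - i.toNat = 6 := by omega
  rw [h6]
  refine ⟨List.length_take_le _ _, ?_⟩
  intro row hrow
  have hrd : row ∈ pvRows s :=
    List.mem_of_mem_drop (List.mem_of_mem_take hrow)
  simp only [pvRows, List.mem_map] at hrd
  obtain ⟨j, hj, rfl⟩ := hrd
  have hj0 : 0 ≤ j := ((PySem.List.mem_pyRange_iff_of_pos (by norm_num) j).mp hj).1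
  rw [PySem.List.slice_toNat _ hj0 (by omega)]
  have h25 : (j + 25).toNat - j.toNat = 25 := by omega
  rw [h25]
  exact List.length_take_le _ _

theorem pvGetDElem (xs : List (List Char)) (r c : Nat) (h1 : r < xs.length)
    (h2 : c < (xs[r]'h1).length) :
    (xs.getD r []).getD c '*' = (xs[r]'h1)[c]'h2 := by
  rw [List.getD_eq_getElem?_getD (l := xs), List.getElem?_eq_getElem h1, Option.getD_some,
    List.getD_eq_getElem?_getD, List.getElem?_eq_getElem h2, Option.getD_some]

theorem pvImage_eq (s : List Char) :
    (pvLayers (pvRows s)).foldl (fun im l => pvApplyLayer im l)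
        (List.replicate 6 (List.replicate 25 '2')) =
      (List.range 6).map (fun r => (List.range 25).map
        (fun c => pvFirst (pvLayers (pvRows s)) r c)) := by
  have hrep : ∀ r' : Nat, r' < 6 →
      (List.replicate 6 (List.replicate 25 '2') : List (List Char)).getD r' [] =
        List.replicate 25 '2' := by
    intro r' h
    rw [List.getD_eq_getElem?_getD, List.getElem?_replicate, if_pos h, Option.getD_some]
  have hbase : ∀ r' c' : Nat, r' < 6 → c' < 25 →
      ((List.replicate 6 (List.replicate 25 '2') : List (List Char)).getD r' []).getD c' '*' =
        '2' := by
    intro r' c' h hc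
    rw [hrep r' h, List.getD_eq_getElem?_getD, List.getElem?_replicate, if_pos hc,
      Option.getD_some]
  obtain ⟨g1, g2, g3⟩ := pvFoldLayers (pvLayers (pvRows s))
    (List.replicate 6 (List.replicate 25 '2')) (pvWF_layers s) (by simp)
    (fun r' h => by rw [hrep r' h, List.length_replicate])
  apply List.ext_getElem
  · rw [g1, List.length_map, List.length_range]
  · intro r h1' h2'
    have h1 : r < 6 := by rwa [g1] at h1'
    have hrowlen : (((pvLayers (pvRows s)).foldl (fun im l => pvApplyLayer im l)
        (List.replicate 6 (List.replicate 25 '2')))[r]'h1').length = 25 := by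
      have hh := g2 r h1
      rwa [List.getD_eq_getElem?_getD, List.getElem?_eq_getElem h1', Option.getD_some] at hh
    apply List.ext_getElem
    · rw [hrowlen]
      simp [List.getElem_map, List.getElem_range]
    · intro c hc1 hc2
      have hc : c < 25 := by rwa [hrowlen] at hc1
      have hval := g3 r c
      rw [if_pos (hbase r c h1 hc), pvGetDElem _ r c h1' hc1] at hval
      rw [hval]
      simp [List.getElem_map, List.getElem_range]

theorem pvReplace_go_single (a b : Char) (fuel : Nat) :
    ∀ (l acc : List Char), l.length ≤ fuel →
    PySem.Chars.replace.go [a] [b] fuel l acc =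
      acc.reverse ++ l.map (fun x => if x = a then b else x) := by
  induction fuel with
  | zero =>
    intro l acc h
    have : l = [] := by cases l <;> simp_all
    subst this
    simp [PySem.Chars.replace.go]
  | succ fuel ih =>
    intro l acc h
    cases l with
    | nil => simp [PySem.Chars.replace.go]
    | cons c t =>
      rw [show PySem.Chars.replace.go [a] [b] (fuel + 1) (c :: t) acc =
          if [a].isPrefixOf (c :: t) then
            PySem.Chars.replace.go [a] [b] fuel (List.drop 1 (c :: t)) ([b].reverse ++ acc)
          else PySem.Chars.replace.go [a] [b] fuel t (c :: acc) from rfl]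
      by_cases hac : a = c
      · subst hac
        rw [if_pos (by simp [List.isPrefixOf]), List.drop_one, List.tail_cons]
        rw [ih t ([b].reverse ++ acc) (by simpa using h)]
        simp
      · have hca : ¬ c = a := fun hh => hac hh.symm
        rw [if_neg (by simp [List.isPrefixOf, hac])]
        rw [ih t (c :: acc) (by simpa using h)]
        simp [hca]

theorem pvReplace_single (cs : List Char) (a b : Char) :
    PySem.Chars.replace cs [a] [b] = cs.map (fun x => if x = a then b else x) := by
  rw [show PySem.Chars.replace cs [a] [b] =
      PySem.Chars.replace.go [a] [b] cs.length cs [] by simp [PySem.Chars.replace]]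
  rw [pvReplace_go_single a b cs.length cs [] (le_refl _)]
  simp

theorem pvReplace_replace (row : List Char) :
    PySem.Chars.replace (PySem.Chars.replace row ['0'] [' ']) ['1'] ['#'] =
      row.map pvPix := by
  rw [pvReplace_single, pvReplace_single, List.map_map]
  apply List.map_congr_left
  intro x _
  by_cases h0 : x = '0'
  · subst h0; decide
  · by_cases h1 : x = '1'
    · subst h1; decide
    · simp [pvPix, h0, h1]

-- ===== VERDICT (by name: the statement is the Claim_ definition above) =====
theorem part2_spec : Claim_equal_part2 := by
  intro input _ _
  unfold Spec_part2 part2 part2_alt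
  simp only [pvImage_eq, List.map_map, Function.comp_def, pvReplace_replace]
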